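-- pv_equiv track=rewrite | github.com/TheAnumaan/CanaraHack | tcn_triplet_per_user.py | get_expected_cols
-- ===== SOURCE A (Python) =====
-- gesture_folders = ["touch", "scrollup", "scrolldown"]
--
-- def get_expected_cols(file_lower, parent_folder, grandparent_folder):
--     if parent_folder == "sensors" and grandparent_folder in gesture_folders:
--         if any(sensor in file_lower for sensor in ["gyro", "lacc", "magn", "nacc"]):
--             return ["timestamp(ms)", "orientation", "x", "y", "z"]
--         elif "grav" in file_lower:
--             return ["timestamp(ms)", "orientation", "gravity_data"]
--         elif "ligh" in file_lower:
--             return ["timestamp(ms)", "orientation", "light_data"]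
--         elif "prox" in file_lower:
--             return ["timestamp(ms)", "orientation", "proximity"]
--         elif "temp" in file_lower:
--             return ["timestamp(ms)", "orientation", "temperature"]
--         elif "swipe" in file_lower or "touch" in file_lower:
--             return ["timestamp(ms)", "orientation", "x", "y", "p", "action"]
--     elif "swipe" in file_lower or "touch" in file_lower:
--         return ["timestamp(ms)", "orientation", "x", "y", "p", "action"]
--     elif any(sensor in file_lower for sensor in ["gyro", "lacc", "magn", "nacc"]):
--         return ["timestamp(ms)", "orientation", "x", "y", "z"]
--     elif "grav" in file_lower:
--         return ["timestamp(ms)", "orientation", "gravity_data"]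
--     elif "ligh" in file_lower:
--         return ["timestamp(ms)", "orientation", "light_data"]
--     elif "prox" in file_lower:
--         return ["timestamp(ms)", "orientation", "proximity"]
--     elif "temp" in file_lower:
--         return ["timestamp(ms)", "orientation", "temperature"]
--     return None
-- ===== SOURCE B (Python) =====
-- gesture_folders = ["touch", "scrollup", "scrolldown"]
--
-- # keyword n-gram -> category; category -> column list
-- CAT = {"gyro": "xyz", "lacc": "xyz", "magn": "xyz", "nacc": "xyz",
--        "grav": "grav", "ligh": "ligh", "prox": "prox", "temp": "temp",
--        "swipe": "touch", "touch": "touch"}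
-- COLS = {"xyz": ["timestamp(ms)", "orientation", "x", "y", "z"],
--         "grav": ["timestamp(ms)", "orientation", "gravity_data"],
--         "ligh": ["timestamp(ms)", "orientation", "light_data"],
--         "prox": ["timestamp(ms)", "orientation", "proximity"],
--         "temp": ["timestamp(ms)", "orientation", "temperature"],
--         "touch": ["timestamp(ms)", "orientation", "x", "y", "p", "action"]}
--
--
-- def get_expected_cols(file_lower, parent_folder, grandparent_folder):
--     # One pass over the filename: hash every 4-gram and 5-gram into CAT,
--     # collecting the set of matched categories; then pick by priority.
--     found = set()
--     for i in range(len(file_lower)):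
--         c = CAT.get(file_lower[i:i + 4])
--         if c is not None:
--             found.add(c)
--         c = CAT.get(file_lower[i:i + 5])
--         if c is not None:
--             found.add(c)
--     sensors_ctx = parent_folder == "sensors" and grandparent_folder in gesture_folders
--     if "touch" in found and not sensors_ctx:
--         return COLS["touch"]
--     for cat in ("xyz", "grav", "ligh", "prox", "temp", "touch"):
--         if cat in found:
--             return COLS[cat]
--     return None
-- ===== Notes on version B (the rewrite author's own statement) =====
-- stated objective: alternative
-- what changed: Replaces A's duplicated substring-test if/elif chains by a single n-gram scan: one pass over the filename hashes every 4- and 5-character slice into a keyword-to-category dict, collecting the set of matched categories, then one priority pick (touch first unless in the sensors context).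
import Mathlib
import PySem

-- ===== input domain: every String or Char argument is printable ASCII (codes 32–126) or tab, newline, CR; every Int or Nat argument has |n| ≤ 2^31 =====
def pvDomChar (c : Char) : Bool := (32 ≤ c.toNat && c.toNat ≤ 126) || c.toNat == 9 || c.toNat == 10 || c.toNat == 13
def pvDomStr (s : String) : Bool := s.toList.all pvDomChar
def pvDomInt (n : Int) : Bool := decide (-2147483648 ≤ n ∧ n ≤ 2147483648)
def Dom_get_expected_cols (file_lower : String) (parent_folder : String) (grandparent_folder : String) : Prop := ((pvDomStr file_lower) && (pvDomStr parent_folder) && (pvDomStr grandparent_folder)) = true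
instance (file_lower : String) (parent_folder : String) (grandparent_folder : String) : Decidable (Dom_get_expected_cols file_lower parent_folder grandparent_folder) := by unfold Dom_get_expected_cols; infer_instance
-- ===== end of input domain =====

-- B replaces A's duplicated keyword if/elif chains by a single n-gram scan of the filename:
-- one pass hashes every 4- and 5-character slice into a keyword→category dict, collecting
-- the set of matched categories, then one priority pick; alternative, same behaviour.

-- ===== PORT A =====
def get_expected_cols (file_lower : String) (parent_folder : String) (grandparent_folder : String) : Option (List String) :=
  if parent_folder = "sensors" ∧ grandparent_folder ∈ ["touch", "scrollup", "scrolldown"] then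
    if (["gyro", "lacc", "magn", "nacc"].any (fun sensor => PySem.Str.isIn sensor file_lower)) then
      some ["timestamp(ms)", "orientation", "x", "y", "z"]
    else if PySem.Str.isIn "grav" file_lower then
      some ["timestamp(ms)", "orientation", "gravity_data"]
    else if PySem.Str.isIn "ligh" file_lower then
      some ["timestamp(ms)", "orientation", "light_data"]
    else if PySem.Str.isIn "prox" file_lower then
      some ["timestamp(ms)", "orientation", "proximity"]
    else if PySem.Str.isIn "temp" file_lower then
      some ["timestamp(ms)", "orientation", "temperature"]
    else if PySem.Str.isIn "swipe" file_lower || PySem.Str.isIn "touch" file_lower then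
      some ["timestamp(ms)", "orientation", "x", "y", "p", "action"]
    else none
  else if PySem.Str.isIn "swipe" file_lower || PySem.Str.isIn "touch" file_lower then
    some ["timestamp(ms)", "orientation", "x", "y", "p", "action"]
  else if (["gyro", "lacc", "magn", "nacc"].any (fun sensor => PySem.Str.isIn sensor file_lower)) then
    some ["timestamp(ms)", "orientation", "x", "y", "z"]
  else if PySem.Str.isIn "grav" file_lower then
    some ["timestamp(ms)", "orientation", "gravity_data"]
  else if PySem.Str.isIn "ligh" file_lower then
    some ["timestamp(ms)", "orientation", "light_data"]
  else if PySem.Str.isIn "prox" file_lower then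
    some ["timestamp(ms)", "orientation", "proximity"]
  else if PySem.Str.isIn "temp" file_lower then
    some ["timestamp(ms)", "orientation", "temperature"]
  else none

-- ===== PORT B =====
-- CAT: n-gram keyword → category (Python's CAT dict)
def pvCat : PySem.Dict String String := PySem.Dict.ofList
  [("gyro", "xyz"), ("lacc", "xyz"), ("magn", "xyz"), ("nacc", "xyz"),
   ("grav", "grav"), ("ligh", "ligh"), ("prox", "prox"), ("temp", "temp"),
   ("swipe", "touch"), ("touch", "touch")]

-- COLS: category → column list (Python's COLS dict)
def pvCols : PySem.Dict String (List String) := PySem.Dict.ofList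
  [("xyz", ["timestamp(ms)", "orientation", "x", "y", "z"]),
   ("grav", ["timestamp(ms)", "orientation", "gravity_data"]),
   ("ligh", ["timestamp(ms)", "orientation", "light_data"]),
   ("prox", ["timestamp(ms)", "orientation", "proximity"]),
   ("temp", ["timestamp(ms)", "orientation", "temperature"]),
   ("touch", ["timestamp(ms)", "orientation", "x", "y", "p", "action"])]

-- the body of B's scanning loop at index i
def pvStep (file_lower : String) (s : PySem.Set String) (i : Int) : PySem.Set String :=
  let s' := match pvCat.get? (PySem.Str.slice file_lower (some i) (some (i + 4))) with
    | some c => PySem.Set.add s c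
    | none => s
  match pvCat.get? (PySem.Str.slice file_lower (some i) (some (i + 5))) with
    | some c => PySem.Set.add s' c
    | none => s'

-- found = the set built by 'for i in range(len(file_lower)): …'
def pvFound (file_lower : String) : PySem.Set String :=
  (PySem.List.pyRange 0 (PySem.Str.len file_lower) 1).foldl (pvStep file_lower) PySem.Set.empty

def get_expected_cols_alt (file_lower : String) (parent_folder : String) (grandparent_folder : String) : Option (List String) :=
  let found := pvFound file_lower
  let sensors_ctx := parent_folder = "sensors" ∧ grandparent_folder ∈ ["touch", "scrollup", "scrolldown"]
  if PySem.Set.contains found "touch" ∧ ¬ sensors_ctx then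
    pvCols.get? "touch"
  else
    (["xyz", "grav", "ligh", "prox", "temp", "touch"].find? (fun cat => PySem.Set.contains found cat)).bind
      (fun cat => pvCols.get? cat)

-- ===== PRECONDITION & SPEC =====
def Spec_get_expected_cols (file_lower : String) (parent_folder : String) (grandparent_folder : String) (out : Option (List String)) : Prop := out = get_expected_cols_alt file_lower parent_folder grandparent_folder
instance (file_lower : String) (parent_folder : String) (grandparent_folder : String) (out : Option (List String)) : Decidable (Spec_get_expected_cols file_lower parent_folder grandparent_folder out) := by unfold Spec_get_expected_cols; infer_instance

-- ===== CLAIM (what is proved, stated in full; the proofs are below) =====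
def Claim_equal_get_expected_cols : Prop := ∀ (file_lower : String) (parent_folder : String) (grandparent_folder : String), Dom_get_expected_cols file_lower parent_folder grandparent_folder → Spec_get_expected_cols file_lower parent_folder grandparent_folder (get_expected_cols file_lower parent_folder grandparent_folder)

-- ===== LEMMAS AND PROOFS =====

lemma pvCat_mk : pvCat = PySem.Dict.mk
  [("gyro", "xyz"), ("lacc", "xyz"), ("magn", "xyz"), ("nacc", "xyz"),
   ("grav", "grav"), ("ligh", "ligh"), ("prox", "prox"), ("temp", "temp"),
   ("swipe", "touch"), ("touch", "touch")] := by decide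

lemma pvCols_mk : pvCols = PySem.Dict.mk
  [("xyz", ["timestamp(ms)", "orientation", "x", "y", "z"]),
   ("grav", ["timestamp(ms)", "orientation", "gravity_data"]),
   ("ligh", ["timestamp(ms)", "orientation", "light_data"]),
   ("prox", ["timestamp(ms)", "orientation", "proximity"]),
   ("temp", ["timestamp(ms)", "orientation", "temperature"]),
   ("touch", ["timestamp(ms)", "orientation", "x", "y", "p", "action"])] := by decide

lemma pvCat_some_xyz (k : String) : pvCat.get? k = some "xyz" ↔ (k = "gyro" ∨ k = "lacc" ∨ k = "magn" ∨ k = "nacc") := by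
  simp only [pvCat_mk, PySem.Dict.get?_mk_cons]
  split_ifs
  all_goals try (rename_i hlast; rw [beq_iff_eq] at hlast; subst hlast; decide)
  refine iff_of_false (by simp [show (PySem.Dict.mk ([] : List (String × String))).get? k = none from rfl]) ?_
  rintro (rfl | rfl | rfl | rfl) <;> simp_all

lemma pvCat_some_grav (k : String) : pvCat.get? k = some "grav" ↔ k = "grav" := by
  simp only [pvCat_mk, PySem.Dict.get?_mk_cons]
  split_ifs
  all_goals try (rename_i hlast; rw [beq_iff_eq] at hlast; subst hlast; decide)
  refine iff_of_false (by simp [show (PySem.Dict.mk ([] : List (String × String))).get? k = none from rfl]) ?_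
  rintro rfl <;> simp_all

lemma pvCat_some_ligh (k : String) : pvCat.get? k = some "ligh" ↔ k = "ligh" := by
  simp only [pvCat_mk, PySem.Dict.get?_mk_cons]
  split_ifs
  all_goals try (rename_i hlast; rw [beq_iff_eq] at hlast; subst hlast; decide)
  refine iff_of_false (by simp [show (PySem.Dict.mk ([] : List (String × String))).get? k = none from rfl]) ?_
  rintro rfl <;> simp_all

lemma pvCat_some_prox (k : String) : pvCat.get? k = some "prox" ↔ k = "prox" := by
  simp only [pvCat_mk, PySem.Dict.get?_mk_cons]
  split_ifs
  all_goals try (rename_i hlast; rw [beq_iff_eq] at hlast; subst hlast; decide)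
  refine iff_of_false (by simp [show (PySem.Dict.mk ([] : List (String × String))).get? k = none from rfl]) ?_
  rintro rfl <;> simp_all

lemma pvCat_some_temp (k : String) : pvCat.get? k = some "temp" ↔ k = "temp" := by
  simp only [pvCat_mk, PySem.Dict.get?_mk_cons]
  split_ifs
  all_goals try (rename_i hlast; rw [beq_iff_eq] at hlast; subst hlast; decide)
  refine iff_of_false (by simp [show (PySem.Dict.mk ([] : List (String × String))).get? k = none from rfl]) ?_
  rintro rfl <;> simp_all

lemma pvCat_some_touch (k : String) : pvCat.get? k = some "touch" ↔ (k = "swipe" ∨ k = "touch") := by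
  simp only [pvCat_mk, PySem.Dict.get?_mk_cons]
  split_ifs
  all_goals try (rename_i hlast; rw [beq_iff_eq] at hlast; subst hlast; decide)
  refine iff_of_false (by simp [show (PySem.Dict.mk ([] : List (String × String))).get? k = none from rfl]) ?_
  rintro (rfl | rfl) <;> simp_all

-- membership in the fold that builds 'found'
lemma mem_foldl_pvStep (f : String) (l : List Int) (s0 : PySem.Set String) (x : String) :
    x ∈ l.foldl (pvStep f) s0 ↔ x ∈ s0 ∨ ∃ i ∈ l,
      pvCat.get? (PySem.Str.slice f (some i) (some (i + 4))) = some x ∨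
      pvCat.get? (PySem.Str.slice f (some i) (some (i + 5))) = some x := by
  induction l generalizing s0 with
  | nil => simp
  | cons a l ih =>
    simp only [List.foldl_cons, ih, pvStep]
    rcases h4 : pvCat.get? (PySem.Str.slice f (some a) (some (a + 4))) with _ | c4 <;>
      rcases h5 : pvCat.get? (PySem.Str.slice f (some a) (some (a + 5))) with _ | c5 <;>
      simp only [PySem.Set.mem_add, List.mem_cons] <;>
      constructor <;> rintro (h | h) <;> aesop

-- a matching slice means the keyword is a substring
lemma slice_eq_isIn (f kw : String) (i L : Int) (h0 : 0 ≤ i) (hL : 0 ≤ L)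
    (h : PySem.Str.slice f (some i) (some (i + L)) = kw) : PySem.Str.isIn kw f = true := by
  have ht : kw.toList = List.take ((i + L).toNat - i.toNat) (List.drop i.toNat f.toList) := by
    rw [← h, PySem.Str.toList_slice, PySem.Chars.slice_eq_listSlice,
      PySem.List.slice_toNat f.toList h0 (by omega)]
  rw [PySem.Str.isIn_eq, ← PySem.Chars.exists_prefix_drop_iff_isIn]
  exact ⟨i.toNat, ht ▸ List.take_prefix _ _⟩

-- a substring of length L is hit by the L-slice at some scanned index
lemma isIn_exists_slice (f kw : String) (L : Int) (hL : (kw.toList.length : Int) = L)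
    (hk : kw.toList ≠ []) (h : PySem.Str.isIn kw f = true) :
    ∃ i ∈ PySem.List.pyRange 0 (PySem.Str.len f) 1, PySem.Str.slice f (some i) (some (i + L)) = kw := by
  rw [PySem.Str.isIn_eq, ← PySem.Chars.exists_prefix_drop_iff_isIn] at h
  obtain ⟨j, hj⟩ := h
  have hlen : kw.toList.length ≤ (f.toList.drop j).length := hj.length_le
  have hpos : 0 < kw.toList.length := List.length_pos_iff.mpr hk
  have hdl : (f.toList.drop j).length = f.toList.length - j := List.length_drop
  have hjlt : j < f.toList.length := by omega
  refine ⟨(j : Int), ?_, ?_⟩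
  · rw [PySem.List.mem_pyRange_one, PySem.Str.len_eq]
    exact ⟨by positivity, by exact_mod_cast hjlt⟩
  · have htake : List.take kw.toList.length (List.drop j f.toList) = kw.toList :=
      (List.prefix_iff_eq_take.mp hj).symm
    have hlist : (PySem.Str.slice f (some (j : Int)) (some ((j : Int) + L))).toList = kw.toList := by
      rw [PySem.Str.toList_slice, PySem.Chars.slice_eq_listSlice,
        PySem.List.slice_toNat f.toList (by positivity) (by omega)]
      have h1 : ((j : Int)).toNat = j := by omega
      have h2 : ((j : Int) + L).toNat = j + kw.toList.length := by omega
      rw [h1, h2, Nat.add_sub_cancel_left, htake]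
    exact String.toList_inj.mp hlist

lemma mem_found_xyz (f : String) :
    "xyz" ∈ pvFound f ↔ (["gyro", "lacc", "magn", "nacc"].any (fun s => PySem.Str.isIn s f)) = true := by
  rw [pvFound, mem_foldl_pvStep]
  simp only [PySem.Set.empty, List.not_mem_nil, false_or, List.any_eq_true, List.mem_cons,
    List.not_mem_nil, or_false]
  constructor
  · rintro ⟨i, hi, h | h⟩ <;>
    · rw [pvCat_some_xyz] at h
      have h0 : (0 : Int) ≤ i := (PySem.List.mem_pyRange_one.mp hi).1
      rcases h with h | h | h | h <;>
        exact ⟨_, by simp, slice_eq_isIn f _ i _ h0 (by norm_num) h⟩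
  · rintro ⟨kw, hkw, hin⟩
    rcases hkw with rfl | rfl | rfl | rfl <;>
    · obtain ⟨i, hi, hs⟩ := isIn_exists_slice f _ 4 (by decide) (by decide) hin
      exact ⟨i, hi, Or.inl ((pvCat_some_xyz _).mpr (by simp [hs]))⟩

lemma mem_found_single (f kw : String) (hkw : kw = "grav" ∨ kw = "ligh" ∨ kw = "prox" ∨ kw = "temp")
    (hiff : ∀ k, pvCat.get? k = some kw ↔ k = kw) :
    kw ∈ pvFound f ↔ PySem.Str.isIn kw f = true := by
  rw [pvFound, mem_foldl_pvStep]
  simp only [PySem.Set.empty, List.not_mem_nil, false_or]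
  constructor
  · rintro ⟨i, hi, h | h⟩ <;>
    · rw [hiff] at h
      have h0 : (0 : Int) ≤ i := (PySem.List.mem_pyRange_one.mp hi).1
      exact slice_eq_isIn f _ i _ h0 (by norm_num) h
  · intro hin
    have hlen : (kw.toList.length : Int) = 4 := by rcases hkw with rfl | rfl | rfl | rfl <;> decide
    have hne : kw.toList ≠ [] := by rcases hkw with rfl | rfl | rfl | rfl <;> decide
    obtain ⟨i, hi, hs⟩ := isIn_exists_slice f kw 4 hlen hne hin
    exact ⟨i, hi, Or.inl (by rw [hiff]; exact hs)⟩

lemma mem_found_touch (f : String) :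
    "touch" ∈ pvFound f ↔ (PySem.Str.isIn "swipe" f || PySem.Str.isIn "touch" f) = true := by
  rw [pvFound, mem_foldl_pvStep]
  simp only [PySem.Set.empty, List.not_mem_nil, false_or, Bool.or_eq_true]
  constructor
  · rintro ⟨i, hi, h | h⟩ <;>
    · rw [pvCat_some_touch] at h
      have h0 : (0 : Int) ≤ i := (PySem.List.mem_pyRange_one.mp hi).1
      rcases h with h | h
      · exact Or.inl (slice_eq_isIn f _ i _ h0 (by norm_num) h)
      · exact Or.inr (slice_eq_isIn f _ i _ h0 (by norm_num) h)
  · rintro (hin | hin)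
    · obtain ⟨i, hi, hs⟩ := isIn_exists_slice f "swipe" 5 (by decide) (by decide) hin
      exact ⟨i, hi, Or.inr (by rw [pvCat_some_touch]; exact Or.inl hs)⟩
    · obtain ⟨i, hi, hs⟩ := isIn_exists_slice f "touch" 5 (by decide) (by decide) hin
      exact ⟨i, hi, Or.inr (by rw [pvCat_some_touch]; exact Or.inr hs)⟩

-- ===== VERDICT (by name: the statement is the Claim_ definition above) =====
set_option maxHeartbeats 6000000 in
theorem get_expected_cols_spec : Claim_equal_get_expected_cols := by
  intro f p g _
  unfold Spec_get_expected_cols get_expected_cols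
  simp only [get_expected_cols_alt]
  by_cases hctx : p = "sensors" ∧ g ∈ ["touch", "scrollup", "scrolldown"]
  · rw [if_pos hctx,
      if_neg (fun hcon : _ ∧ ¬(p = "sensors" ∧ g ∈ ["touch", "scrollup", "scrolldown"]) => hcon.2 hctx)]
    clear hctx
    cases hs : ["gyro", "lacc", "magn", "nacc"].any (fun sensor => PySem.Str.isIn sensor f) <;>
      cases h5 : PySem.Str.isIn "grav" f <;>
      cases h6 : PySem.Str.isIn "ligh" f <;>
      cases h7 : PySem.Str.isIn "prox" f <;>
      cases h8 : PySem.Str.isIn "temp" f <;>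
      cases h9 : PySem.Str.isIn "swipe" f <;>
      cases h10 : PySem.Str.isIn "touch" f <;>
      simp_all [List.find?, pvCols_mk, PySem.Dict.get?_mk_cons, mem_found_xyz,
        mem_found_touch, mem_found_single f "grav" (by simp) pvCat_some_grav,
        mem_found_single f "ligh" (by simp) pvCat_some_ligh,
        mem_found_single f "prox" (by simp) pvCat_some_prox,
        mem_found_single f "temp" (by simp) pvCat_some_temp]
  · rw [if_neg hctx]
    cases hs : ["gyro", "lacc", "magn", "nacc"].any (fun sensor => PySem.Str.isIn sensor f) <;>
      cases h5 : PySem.Str.isIn "grav" f <;>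
      cases h6 : PySem.Str.isIn "ligh" f <;>
      cases h7 : PySem.Str.isIn "prox" f <;>
      cases h8 : PySem.Str.isIn "temp" f <;>
      cases h9 : PySem.Str.isIn "swipe" f <;>
      cases h10 : PySem.Str.isIn "touch" f <;>
      simp_all [List.find?, pvCols_mk, PySem.Dict.get?_mk_cons, mem_found_xyz,
        mem_found_touch, mem_found_single f "grav" (by simp) pvCat_some_grav,
        mem_found_single f "ligh" (by simp) pvCat_some_ligh,
        mem_found_single f "prox" (by simp) pvCat_some_prox,
        mem_found_single f "temp" (by simp) pvCat_some_temp]
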